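-- pv_equiv track=rewrite | github.com/nsirano/Intro-to-Open-Source-Fall-2016 | lab7/word_ladder.py | hamming1
-- ===== SOURCE A (Python) =====
-- from itertools import izip
--
-- def hamming1(str1, str2):
--     '''
--     Returns True if the hamming distance is 1.
--     Returns False otherwise
--     '''
--     assert len(str1) == len(str2), "String lengths are unequal: str1 = %s, str2 = %s"%(str1,str2)
--     unequal = 0
--     for c1, c2 in izip(str1, str2):
--         if c1 != c2:
--             if unequal == 0:
--                 unequal += 1
--             else:
--                 return False
--
--     return True
-- ===== SOURCE B (Python) =====
-- def hamming1(str1, str2):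
--     assert len(str1) == len(str2), "String lengths are unequal: str1 = %s, str2 = %s"%(str1,str2)
--     if str1 == str2:
--         return True
--     i = 0
--     while str1[i] == str2[i]:
--         i += 1
--     return str1[i+1:] == str2[i+1:]
-- ===== Notes on version B (the rewrite author's own statement) =====
-- stated objective: alternative
-- what changed: Replaces the mismatch-counting state machine with find-the-first-differing-index and a single suffix equality comparison (equal strings returned early).
import Mathlib
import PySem

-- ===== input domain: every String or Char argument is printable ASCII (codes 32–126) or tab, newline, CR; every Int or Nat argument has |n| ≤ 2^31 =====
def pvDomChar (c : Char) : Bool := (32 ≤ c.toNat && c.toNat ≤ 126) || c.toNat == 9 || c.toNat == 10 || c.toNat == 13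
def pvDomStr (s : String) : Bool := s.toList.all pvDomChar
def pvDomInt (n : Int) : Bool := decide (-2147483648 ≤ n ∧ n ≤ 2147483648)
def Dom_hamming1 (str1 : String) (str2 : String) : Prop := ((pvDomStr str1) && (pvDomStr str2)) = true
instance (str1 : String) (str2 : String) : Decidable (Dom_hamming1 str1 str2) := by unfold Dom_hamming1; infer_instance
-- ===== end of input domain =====

-- B replaces A's mismatch-counting loop with find-first-difference-then-compare-suffix; same O(n) cost (objective: alternative).


-- ===== PORT A =====
-- the for-loop over izip(str1, str2) with the 'unequal' counter and early 'return False'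
def hamming1Loop : List (Char × Char) → Nat → Bool
  | [], _ => true
  | (c1, c2) :: rest, unequal =>
      if c1 ≠ c2 then
        if unequal = 0 then hamming1Loop rest 1
        else false
      else hamming1Loop rest unequal

def hamming1 (str1 : String) (str2 : String) : Bool :=
  hamming1Loop (str1.toList.zip str2.toList) 0

-- ===== PORT B =====
-- the while-loop skipping equal characters; at the first difference compare the suffixes str1[i+1:] == str2[i+1:]
def hamming1AltLoop : List Char → List Char → Bool
  | c1 :: t1, c2 :: t2 =>
      if c1 = c2 then hamming1AltLoop t1 t2
      else decide (t1 = t2)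
  | _, _ => true

def hamming1_alt (str1 : String) (str2 : String) : Bool :=
  if str1 = str2 then true
  else hamming1AltLoop str1.toList str2.toList

-- ===== PRECONDITION & SPEC =====
-- A's assert raises AssertionError when the lengths differ; exactly those inputs are excluded.
def Pre_hamming1 (str1 : String) (str2 : String) : Prop :=
  str1.toList.length = str2.toList.length
instance (str1 : String) (str2 : String) : Decidable (Pre_hamming1 str1 str2) := by
  unfold Pre_hamming1; infer_instance

def pvWitness_hamming1 : String × String := ("ab", "ac")

def Spec_hamming1 (str1 : String) (str2 : String) (out : Bool) : Prop := out = hamming1_alt str1 str2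
instance (str1 : String) (str2 : String) (out : Bool) : Decidable (Spec_hamming1 str1 str2 out) := by unfold Spec_hamming1; infer_instance

-- ===== CLAIM (what is proved, stated in full; the proofs are below) =====
def Claim_equal_hamming1 : Prop := ∀ (str1 : String) (str2 : String), Dom_hamming1 str1 str2 → Pre_hamming1 str1 str2 → Spec_hamming1 str1 str2 (hamming1 str1 str2)

-- ===== LEMMAS AND PROOFS =====

-- A's loop with unequal = 1 just tests whether the remaining pairs are all equal
lemma hamming1Loop_one (l1 l2 : List Char) (h : l1.length = l2.length) :
    hamming1Loop (l1.zip l2) 1 = decide (l1 = l2) := by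
  induction l1 generalizing l2 with
  | nil => cases l2 with
    | nil => simp [hamming1Loop]
    | cons b t2 => simp at h
  | cons a t1 ih =>
    cases l2 with
    | nil => simp at h
    | cons b t2 =>
      simp at h
      by_cases hab : a = b
      · subst hab
        simp [hamming1Loop, ih t2 h]
      · simp [hamming1Loop, hab]

lemma hamming1Loop_eq_altLoop (l1 l2 : List Char) (h : l1.length = l2.length) :
    hamming1Loop (l1.zip l2) 0 = hamming1AltLoop l1 l2 := by
  induction l1 generalizing l2 with
  | nil => cases l2 with
    | nil => simp [hamming1Loop, hamming1AltLoop]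
    | cons b t2 => simp at h
  | cons a t1 ih =>
    cases l2 with
    | nil => simp at h
    | cons b t2 =>
      simp at h
      by_cases hab : a = b
      · subst hab
        simp [hamming1Loop, hamming1AltLoop, ih t2 h]
      · simp [hamming1Loop, hamming1AltLoop, hab, hamming1Loop_one t1 t2 h]

lemma altLoop_self (l : List Char) : hamming1AltLoop l l = true := by
  induction l with
  | nil => rfl
  | cons a t ih => simp [hamming1AltLoop, ih]

-- ===== VERDICT (by name: the statement is the Claim_ definition above) =====
theorem hamming1_spec : Claim_equal_hamming1 := by
  intro str1 str2 _ hpre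
  unfold Spec_hamming1 hamming1 hamming1_alt
  rw [hamming1Loop_eq_altLoop str1.toList str2.toList hpre]
  by_cases hs : str1 = str2
  · subst hs; simp [altLoop_self]
  · simp [hs]
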